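-- pv_equiv track=rewrite | github.com/cjmcgreal/exercise | src/tree_viewer/tree_viewer_analysis.py | count_descendants
-- ===== SOURCE A (Python) =====
-- from typing import Dict, List, Any
--
-- def count_descendants(
--     node_name: str,
--     children_map: Dict[str, List[str]],
--     visited: set = None
-- ) -> int:
--     """
--     Count total descendants of a node.
--
--     Args:
--         node_name: Name of the node
--         children_map: Parent -> children mapping
--         visited: Set of visited nodes for cycle detection
--
--     Returns:
--         Number of descendants (not including the node itself)
--     """
--     if visited is None:
--         visited = set()
--
--     if node_name in visited:
--         return 0
--
--     visited.add(node_name)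
--     count = 0
--
--     for child in children_map.get(node_name, []):
--         count += 1 + count_descendants(child, children_map, visited)
--
--     return count
-- ===== SOURCE B (Python) =====
-- def count_descendants(node_name, children_map, visited=None):
--     # Iterative explicit-stack DFS: counts one per child edge of each newly
--     # visited node; mutates `visited` to the same final set as the recursion.
--     if visited is None:
--         visited = set()
--     stack = [node_name]
--     count = 0
--     while stack:
--         u = stack.pop()
--         if u in visited:
--             continue
--         visited.add(u)
--         children = children_map.get(u, [])
--         count += len(children)
--         stack.extend(reversed(children))
--     return count
-- ===== Notes on version B (the rewrite author's own statement) =====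
-- stated objective: alternative
-- what changed: Replaces the recursive DFS (count += 1 + recurse(child) per child) with an iterative explicit-stack loop that, for each newly visited node, adds its out-degree to the count and pushes its children, eliminating recursion entirely.
import Mathlib
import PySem

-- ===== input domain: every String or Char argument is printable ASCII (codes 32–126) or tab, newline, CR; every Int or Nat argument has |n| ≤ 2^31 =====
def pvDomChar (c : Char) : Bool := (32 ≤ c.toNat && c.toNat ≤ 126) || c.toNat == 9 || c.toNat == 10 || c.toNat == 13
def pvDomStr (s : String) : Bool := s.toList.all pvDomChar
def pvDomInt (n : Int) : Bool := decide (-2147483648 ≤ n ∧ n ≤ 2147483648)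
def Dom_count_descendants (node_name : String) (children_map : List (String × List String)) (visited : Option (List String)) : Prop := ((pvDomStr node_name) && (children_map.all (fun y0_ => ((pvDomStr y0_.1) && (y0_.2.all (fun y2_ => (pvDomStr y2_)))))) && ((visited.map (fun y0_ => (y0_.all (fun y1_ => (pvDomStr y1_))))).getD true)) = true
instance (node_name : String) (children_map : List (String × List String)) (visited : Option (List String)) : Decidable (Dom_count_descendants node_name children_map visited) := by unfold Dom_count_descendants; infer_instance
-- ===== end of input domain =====

-- B replaces A's recursive DFS by an iterative explicit-stack DFS (same count, same
-- final `visited` set, which both mutate in place); equivalence is about the return value.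

-- ===== PORT A =====
-- Recursive DFS of A, fuel-guarded for totality (one fuel unit per newly visited node;
-- the fuel chosen by `count_descendants` below is proven never to run out).
mutual
def pvGoA (d : PySem.Dict String (List String)) (fuel : Nat) (node : String)
    (vis : PySem.Set String) : Int × PySem.Set String :=
  match fuel with
  | 0 => (0, vis)  -- unreachable with the fuel chosen below
  | fuel' + 1 =>
    if PySem.Set.contains vis node then (0, vis)
    else pvGoKids d fuel' (PySem.Dict.getD d node []) (PySem.Set.add vis node)
  termination_by (fuel, 0)

-- the `for child in …: count += 1 + count_descendants(child, …)` loop, threading `visited`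
def pvGoKids (d : PySem.Dict String (List String)) (fuel : Nat) (l : List String)
    (vis : PySem.Set String) : Int × PySem.Set String :=
  match l with
  | [] => (0, vis)
  | c :: rest =>
    let r := pvGoA d fuel c vis
    let r2 := pvGoKids d fuel rest r.2
    (1 + r.1 + r2.1, r2.2)
  termination_by (fuel, l.length + 1)
end

def count_descendants (node_name : String) (children_map : List (String × List String)) (visited : Option (List String)) : Int :=
  (pvGoA (PySem.Dict.ofList children_map)
    ((node_name :: (PySem.Dict.ofList children_map).items.flatMap Prod.snd).length + 1)
    node_name (PySem.Set.ofList (visited.getD []))).1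

-- ===== PORT B =====
-- the `while stack:` loop; Lean list head = Python stack top, so `stack.extend(reversed(cs))`
-- then popping is `cs ++ rest`; fuel-guarded (one unit per newly visited node, never runs out)
def pvBLoop (d : PySem.Dict String (List String)) (fuel : Nat) (stack : List String)
    (vis : PySem.Set String) (count : Int) : Int :=
  match fuel, stack with
  | _, [] => count
  | 0, _ :: _ => count  -- unreachable with the fuel chosen below
  | fuel' + 1, u :: rest =>
    if PySem.Set.contains vis u then pvBLoop d (fuel' + 1) rest vis count
    else
      pvBLoop d fuel' (PySem.Dict.getD d u [] ++ rest) (PySem.Set.add vis u)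
        (count + (PySem.Dict.getD d u []).length)
  termination_by (fuel, stack.length)

def count_descendants_alt (node_name : String) (children_map : List (String × List String)) (visited : Option (List String)) : Int :=
  pvBLoop (PySem.Dict.ofList children_map)
    ((node_name :: (PySem.Dict.ofList children_map).items.flatMap Prod.snd).length + 1)
    [node_name] (PySem.Set.ofList (visited.getD [])) 0

-- ===== PRECONDITION & SPEC =====
def Spec_count_descendants (node_name : String) (children_map : List (String × List String)) (visited : Option (List String)) (out : Int) : Prop := out = count_descendants_alt node_name children_map visited
instance (node_name : String) (children_map : List (String × List String)) (visited : Option (List String)) (out : Int) : Decidable (Spec_count_descendants node_name children_map visited out) := by unfold Spec_count_descendants; infer_instance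

-- ===== CLAIM (what is proved, stated in full; the proofs are below) =====
def Claim_equal_count_descendants : Prop := ∀ (node_name : String) (children_map : List (String × List String)) (visited : Option (List String)), Dom_count_descendants node_name children_map visited → Spec_count_descendants node_name children_map visited (count_descendants node_name children_map visited)

-- ===== LEMMAS AND PROOFS =====

-- number of nodes of U not yet visited: the quantity the fuel pays for
def pvUnvis (U : List String) (vis : PySem.Set String) : Nat :=
  U.countP (fun x => decide (x ∉ vis))

theorem pvUnvis_le_length (U : List String) (vis : PySem.Set String) :
    pvUnvis U vis ≤ U.length :=
  List.countP_le_length ..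

theorem pvUnvis_mono (U : List String) (v1 v2 : PySem.Set String)
    (h : ∀ x, x ∈ v1 → x ∈ v2) : pvUnvis U v2 ≤ pvUnvis U v1 := by
  refine List.countP_mono_left ?_
  intro x _ hx
  simp only [decide_eq_true_eq] at hx ⊢
  exact fun hm => hx (h x hm)

theorem pvUnvis_add_lt (U : List String) (vis : PySem.Set String) (n : String)
    (hU : n ∈ U) (hn : n ∉ vis) : pvUnvis U (PySem.Set.add vis n) < pvUnvis U vis := by
  induction U with
  | nil => cases hU
  | cons a U' ih =>
    have hsub : ∀ x, x ∈ vis → x ∈ PySem.Set.add vis n := by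
      intro x hx
      simp [PySem.Set.mem_add, hx]
    have hmono : pvUnvis U' (PySem.Set.add vis n) ≤ pvUnvis U' vis :=
      pvUnvis_mono U' vis (PySem.Set.add vis n) hsub
    unfold pvUnvis at hmono ⊢
    by_cases ha : a = n
    · subst ha
      have e1 : (decide (a ∉ vis)) = true := by simpa using hn
      have e2 : (decide (a ∉ PySem.Set.add vis a)) = false := by
        simp [PySem.Set.mem_add]
      simp only [List.countP_cons, e1, e2]
      simp only [if_true, Bool.false_eq_true, if_false]
      omega
    · have hU' : n ∈ U' := by
        cases hU with
        | head => exact absurd rfl ha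
        | tail _ h => exact h
      have ihs := ih hU'
      unfold pvUnvis at ihs
      have hpred : (decide (a ∉ PySem.Set.add vis n)) = (decide (a ∉ vis)) := by
        simp only [PySem.Set.mem_add, decide_eq_decide]
        constructor
        · exact fun h hm => h (Or.inl hm)
        · intro h hm
          cases hm with
          | inl hm => exact h hm
          | inr hm => exact ha hm
      simp only [List.countP_cons, hpred]
      by_cases hav : a ∉ vis
      · have e1 : (decide (a ∉ vis)) = true := by simpa using hav
        simp only [e1, if_true]
        omega
      · have e1 : (decide (a ∉ vis)) = false := by simpa using hav
        simp only [e1]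
        omega

-- the visited set only grows
mutual
theorem pvGoA_mono (d : PySem.Dict String (List String)) (fuel : Nat) (node : String)
    (vis : PySem.Set String) : ∀ x, x ∈ vis → x ∈ (pvGoA d fuel node vis).2 := by
  intro x hx
  match fuel with
  | 0 => simpa [pvGoA] using hx
  | fuel' + 1 =>
    rw [pvGoA]
    by_cases h : node ∈ vis
    · simp [h, hx]
    · have hc : ¬ (PySem.Set.contains vis node = true) := by
        rw [PySem.Set.contains_iff]; exact h
      rw [if_neg hc]
      exact pvGoKids_mono d fuel' _ _ x (by simp [PySem.Set.mem_add, hx])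
  termination_by (fuel, 0)
theorem pvGoKids_mono (d : PySem.Dict String (List String)) (fuel : Nat) (l : List String)
    (vis : PySem.Set String) : ∀ x, x ∈ vis → x ∈ (pvGoKids d fuel l vis).2 := by
  intro x hx
  match l with
  | [] => simpa [pvGoKids] using hx
  | c :: rest =>
    rw [pvGoKids]
    exact pvGoKids_mono d fuel rest _ x (pvGoA_mono d fuel c vis x hx)
  termination_by (fuel, l.length + 1)
end

-- with enough fuel the result does not depend on the fuel
mutual
theorem pvGoA_fuel (d : PySem.Dict String (List String)) (U : List String)
    (HU : ∀ m x, x ∈ PySem.Dict.getD d m [] → x ∈ U)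
    (f f' : Nat) (node : String) (vis : PySem.Set String)
    (hf : pvUnvis U vis < f) (hf' : pvUnvis U vis < f') (hn : node ∈ U) :
    pvGoA d f node vis = pvGoA d f' node vis := by
  match f, f' with
  | f1 + 1, f1' + 1 =>
    rw [pvGoA, pvGoA]
    by_cases h : node ∈ vis
    · simp [h]
    · have hc : ¬ (PySem.Set.contains vis node = true) := by
        rw [PySem.Set.contains_iff]; exact h
      rw [if_neg hc, if_neg hc]
      have hlt := pvUnvis_add_lt U vis node hn h
      exact pvGoKids_fuel d U HU f1 f1' _ _ (by omega) (by omega) (fun x hx => HU node x hx)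
  termination_by (f + f', 0)
theorem pvGoKids_fuel (d : PySem.Dict String (List String)) (U : List String)
    (HU : ∀ m x, x ∈ PySem.Dict.getD d m [] → x ∈ U)
    (f f' : Nat) (l : List String) (vis : PySem.Set String)
    (hf : pvUnvis U vis < f) (hf' : pvUnvis U vis < f') (hl : ∀ x ∈ l, x ∈ U) :
    pvGoKids d f l vis = pvGoKids d f' l vis := by
  match l with
  | [] => simp [pvGoKids]
  | c :: rest =>
    rw [pvGoKids, pvGoKids]
    have e1 : pvGoA d f c vis = pvGoA d f' c vis :=
      pvGoA_fuel d U HU f f' c vis hf hf' (hl c (List.mem_cons_self ..))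
    rw [e1]
    have hle : pvUnvis U (pvGoA d f' c vis).2 ≤ pvUnvis U vis :=
      pvUnvis_mono U _ _ (pvGoA_mono d f' c vis)
    have e2 : pvGoKids d f rest (pvGoA d f' c vis).2
        = pvGoKids d f' rest (pvGoA d f' c vis).2 :=
      pvGoKids_fuel d U HU f f' rest _ (by omega) (by omega)
        (fun x hx => hl x (List.mem_cons_of_mem _ hx))
    rw [e2]
  termination_by (f + f', l.length + 1)
end

theorem pvGoKids_append (d : PySem.Dict String (List String)) (f : Nat)
    (xs ys : List String) (vis : PySem.Set String) :
    pvGoKids d f (xs ++ ys) vis =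
      ((pvGoKids d f xs vis).1 + (pvGoKids d f ys (pvGoKids d f xs vis).2).1,
       (pvGoKids d f ys (pvGoKids d f xs vis).2).2) := by
  induction xs generalizing vis with
  | nil => simp [pvGoKids]
  | cons c rest ih =>
    simp only [List.cons_append]
    rw [pvGoKids, ih, pvGoKids]
    simp only [Prod.mk.injEq]
    constructor
    · ring
    · trivial

-- simulation: the stack loop computes the recursion's sum over the stack
theorem pvSim (d : PySem.Dict String (List String)) (U : List String)
    (HU : ∀ m x, x ∈ PySem.Dict.getD d m [] → x ∈ U) :
    ∀ g f stack vis count, (∀ x ∈ stack, x ∈ U) →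
      pvUnvis U vis < f → pvUnvis U vis < g →
      pvBLoop d g stack vis count = count + (pvGoKids d f stack vis).1 - stack.length := by
  intro g
  induction g using Nat.strong_induction_on with
  | _ g IHg =>
  intro f stack
  induction stack with
  | nil =>
    intro vis count _ hf hg
    match g with
    | 0 => simp [pvBLoop, pvGoKids]
    | g1 + 1 => simp [pvBLoop, pvGoKids]
  | cons n rest ih =>
    intro vis count hstack hf hg
    match g, f, hg, hf, IHg, ih with
    | g1 + 1, f1 + 1, hg, hf, IHg, ih =>
      rw [pvBLoop]
      by_cases hn : n ∈ vis
      · have hc : PySem.Set.contains vis n = true := by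
          rw [PySem.Set.contains_iff]; exact hn
        rw [if_pos hc]
        have ihr := ih vis count (fun x hx => hstack x (List.mem_cons_of_mem _ hx)) hf hg
        rw [ihr, pvGoKids, pvGoA, if_pos hc]
        simp only [List.length_cons]
        push_cast
        ring
      · have hc : ¬ (PySem.Set.contains vis n = true) := by
          rw [PySem.Set.contains_iff]; exact hn
        rw [if_neg hc]
        have hUn : n ∈ U := hstack n (List.mem_cons_self ..)
        have hlt := pvUnvis_add_lt U vis n hUn hn
        have hsub : ∀ x ∈ PySem.Dict.getD d n [] ++ rest, x ∈ U := by
          intro x hx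
          rcases List.mem_append.mp hx with hx | hx
          · exact HU n x hx
          · exact hstack x (List.mem_cons_of_mem _ hx)
        have key := IHg g1 (by omega) g1 (PySem.Dict.getD d n [] ++ rest)
          (PySem.Set.add vis n) (count + (PySem.Dict.getD d n []).length)
          hsub (by omega) (by omega)
        rw [key, pvGoKids_append]
        have e1 : pvGoKids d g1 (PySem.Dict.getD d n []) (PySem.Set.add vis n)
            = pvGoKids d f1 (PySem.Dict.getD d n []) (PySem.Set.add vis n) :=
          pvGoKids_fuel d U HU g1 f1 _ _ (by omega) (by omega) (fun x hx => HU n x hx)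
        rw [e1]
        have hle : pvUnvis U (pvGoKids d f1 (PySem.Dict.getD d n []) (PySem.Set.add vis n)).2
            ≤ pvUnvis U (PySem.Set.add vis n) :=
          pvUnvis_mono U _ _ (pvGoKids_mono d f1 _ _)
        have e2 : pvGoKids d g1 rest (pvGoKids d f1 (PySem.Dict.getD d n []) (PySem.Set.add vis n)).2
            = pvGoKids d (f1 + 1) rest (pvGoKids d f1 (PySem.Dict.getD d n []) (PySem.Set.add vis n)).2 :=
          pvGoKids_fuel d U HU g1 (f1 + 1) rest _ (by omega) (by omega)
            (fun x hx => hstack x (List.mem_cons_of_mem _ hx))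
        rw [e2, pvGoKids, pvGoA, if_neg hc]
        simp only [List.length_append, List.length_cons]
        push_cast
        ring

-- a value produced by get? is one of the dict's values
theorem pv_get?_mem_values (d : PySem.Dict String (List String)) (k : String)
    (v : List String) (h : PySem.Dict.get? d k = some v) : v ∈ PySem.Dict.values d := by
  cases d with
  | mk items =>
    induction items with
    | nil => simp [PySem.Dict.get?] at h
    | cons p rest ihp =>
      obtain ⟨a, b⟩ := p
      rw [PySem.Dict.get?_mk_cons] at h
      by_cases hk : (a == k) = true
      · simp only [hk, if_true, Option.some.injEq] at h
        subst h
        simp [PySem.Dict.values]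
      · simp only [hk, Bool.false_eq_true, if_false] at h
        have := ihp h
        simp [PySem.Dict.values] at this ⊢
        exact Or.inr this

-- ===== VERDICT (by name: the statement is the Claim_ definition above) =====
theorem count_descendants_spec : Claim_equal_count_descendants := by
  intro node_name children_map visited _
  unfold Spec_count_descendants count_descendants count_descendants_alt
  set d := PySem.Dict.ofList children_map with hd
  set vis0 : PySem.Set String := PySem.Set.ofList (visited.getD []) with hvis
  set U : List String := node_name :: d.items.flatMap Prod.snd with hU
  have HU : ∀ m x, x ∈ PySem.Dict.getD d m [] → x ∈ U := by
    intro m x hx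
    rw [PySem.Dict.getD_eq_get?_getD] at hx
    cases hq : PySem.Dict.get? d m with
    | none => rw [hq] at hx; simp at hx
    | some v =>
      rw [hq] at hx
      simp only [Option.getD_some] at hx
      have hv : v ∈ PySem.Dict.values d := pv_get?_mem_values d m v hq
      have hfl : x ∈ d.items.flatMap Prod.snd := by
        simp only [PySem.Dict.values] at hv
        rcases List.mem_map.mp hv with ⟨p, hp, hpv⟩
        exact List.mem_flatMap.mpr ⟨p, hp, by rw [hpv]; exact hx⟩
      exact List.mem_cons_of_mem _ hfl
  have hfuel : pvUnvis U vis0 < U.length + 1 := by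
    have := pvUnvis_le_length U vis0
    omega
  have hs := pvSim d U HU (U.length + 1) (U.length + 1) [node_name] vis0 0
    (by intro x hx; simp only [List.mem_singleton] at hx; subst hx; exact List.mem_cons_self ..)
    hfuel hfuel
  rw [hs, pvGoKids, pvGoKids]
  simp only [List.length_cons, List.length_nil]
  push_cast
  ring
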